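-- pv_equiv track=rewrite | github.com/sigurdvaa/adventofcode | 2015/15-science-for-hungry-people.py | recipe_score
-- ===== SOURCE A (Python) =====
-- def recipe_score(ingredients: dict, recipe: dict, calories: int = -1):
--     score = {}
--     for item in recipe:
--         for prop in ingredients[item]:
--             if prop in score:
--                 score[prop] += recipe[item] * ingredients[item][prop]
--             else:
--                 score[prop] = recipe[item] * ingredients[item][prop]
--
--     if calories != -1:
--         if score["calories"] != calories:
--             return 0
--
--     total_score = 1
--     for prop in score:
--         if prop != "calories":
--             if score[prop] < 1:
--                 return 0
--             else:
--                 total_score *= score[prop]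
--
--     return total_score
-- ===== SOURCE B (Python) =====
-- def recipe_score(ingredients: dict, recipe: dict, calories: int = -1):
--     props = []
--     for item in recipe:
--         for prop in ingredients[item]:
--             if prop not in props:
--                 props.append(prop)
--
--     def prop_total(prop):
--         return sum(recipe[item] * ingredients[item].get(prop, 0) for item in recipe)
--
--     if calories != -1 and prop_total("calories") != calories:
--         return 0
--
--     total = 1
--     for prop in props:
--         if prop != "calories":
--             v = prop_total(prop)
--             if v < 1:
--                 return 0
--             total *= v
--     return total
-- ===== Notes on version B (the rewrite author's own statement) =====
-- stated objective: alternative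
-- what changed: A builds a score dict in one fused incremental pass over recipe items and properties; B builds no score dict at all: it collects the ordered union of property keys, then recomputes each needed property total on demand as a separate sum over the recipe (using .get(prop,0)), keeping the same calories guard and early-exit product.
import Mathlib
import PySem

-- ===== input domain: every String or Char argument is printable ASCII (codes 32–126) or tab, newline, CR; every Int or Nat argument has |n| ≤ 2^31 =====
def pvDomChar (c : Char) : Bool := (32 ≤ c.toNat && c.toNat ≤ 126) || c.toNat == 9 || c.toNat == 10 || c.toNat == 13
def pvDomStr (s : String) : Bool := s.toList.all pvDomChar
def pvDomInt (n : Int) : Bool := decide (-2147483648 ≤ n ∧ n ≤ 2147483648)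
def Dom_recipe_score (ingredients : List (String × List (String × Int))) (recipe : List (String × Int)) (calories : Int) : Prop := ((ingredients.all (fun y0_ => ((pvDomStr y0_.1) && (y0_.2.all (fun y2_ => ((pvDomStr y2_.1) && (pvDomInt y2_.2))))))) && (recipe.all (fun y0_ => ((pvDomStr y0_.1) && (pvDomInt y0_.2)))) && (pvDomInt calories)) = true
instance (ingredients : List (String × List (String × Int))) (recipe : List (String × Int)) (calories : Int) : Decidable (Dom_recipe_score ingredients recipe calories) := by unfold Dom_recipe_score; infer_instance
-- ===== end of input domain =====

-- B builds no score dict: it collects the ordered union of property keys and recomputes each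
-- property total on demand as a separate sum over the recipe; same guard and product (objective: alternative).


-- ===== PORT A =====
-- shared conversion of the Python argument dicts to PySem.Dict (both Pythons receive the same dicts)
def ingDict (ingredients : List (String × List (String × Int))) : PySem.Dict String (PySem.Dict String Int) :=
  PySem.Dict.ofList (ingredients.map (fun p => (p.1, PySem.Dict.ofList p.2)))

-- the fused double loop of A building `score` (score[prop] lookups via getD; Pre_ rules out A's KeyError)
def scoreLoopA (ing : PySem.Dict String (PySem.Dict String Int)) (rc : PySem.Dict String Int) : PySem.Dict String Int :=
  rc.keys.foldl (fun sc item =>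
    ((ing.getD item PySem.Dict.empty).keys).foldl (fun sc prop =>
      if sc.contains prop then
        sc.insert prop (sc.getD prop 0 + rc.getD item 0 * (ing.getD item PySem.Dict.empty).getD prop 0)
      else
        sc.insert prop (rc.getD item 0 * (ing.getD item PySem.Dict.empty).getD prop 0)) sc)
    PySem.Dict.empty

-- A's final loop with its early `return 0`
def prodLoopA (ps : List String) (sc : PySem.Dict String Int) (total : Int) : Int :=
  match ps with
  | [] => total
  | p :: rest =>
    if p ≠ "calories" then
      if sc.getD p 0 < 1 then 0 else prodLoopA rest sc (total * sc.getD p 0)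
    else prodLoopA rest sc total

def recipe_score (ingredients : List (String × List (String × Int))) (recipe : List (String × Int)) (calories : Int) : Int :=
  let ing := ingDict ingredients
  let rc := PySem.Dict.ofList recipe
  let score := scoreLoopA ing rc
  if calories ≠ -1 then
    if score.getD "calories" 0 ≠ calories then 0
    else prodLoopA score.keys score 1
  else prodLoopA score.keys score 1

-- ===== PORT B =====
-- B phase 1: ordered union of all property keys
def propsLoopB (ing : PySem.Dict String (PySem.Dict String Int)) (rc : PySem.Dict String Int) : List String :=
  rc.keys.foldl (fun ps item =>
    ((ing.getD item PySem.Dict.empty).keys).foldl (fun ps prop => PySem.Set.add ps prop) ps) []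

-- B's on-demand total for one property: sum(recipe[item] * ingredients[item].get(prop, 0) for item in recipe)
def propTotalB (ing : PySem.Dict String (PySem.Dict String Int)) (rc : PySem.Dict String Int) (prop : String) : Int :=
  rc.keys.foldl (fun s item => s + rc.getD item 0 * (ing.getD item PySem.Dict.empty).getD prop 0) 0

-- B's final loop: recomputes each total, early return 0 on v < 1
def prodLoopB (ing : PySem.Dict String (PySem.Dict String Int)) (rc : PySem.Dict String Int)
    (ps : List String) (total : Int) : Int :=
  match ps with
  | [] => total
  | p :: rest =>
    if p ≠ "calories" then
      let v := propTotalB ing rc p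
      if v < 1 then 0 else prodLoopB ing rc rest (total * v)
    else prodLoopB ing rc rest total

def recipe_score_alt (ingredients : List (String × List (String × Int))) (recipe : List (String × Int)) (calories : Int) : Int :=
  let ing := ingDict ingredients
  let rc := PySem.Dict.ofList recipe
  if calories ≠ -1 && propTotalB ing rc "calories" ≠ calories then 0
  else prodLoopB ing rc (propsLoopB ing rc) 1

-- ===== PRECONDITION & SPEC =====
-- Pre_ excludes exactly the inputs where the Python A raises KeyError:
-- a recipe item absent from ingredients, or calories ≠ -1 while no used ingredient has a "calories" property.
def Pre_recipe_score (ingredients : List (String × List (String × Int))) (recipe : List (String × Int)) (calories : Int) : Prop :=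
  (∀ item ∈ (PySem.Dict.ofList recipe).keys,
      (PySem.Dict.ofList (ingredients.map (fun p => (p.1, PySem.Dict.ofList p.2)))).contains item = true) ∧
  (calories = -1 ∨ ∃ item ∈ (PySem.Dict.ofList recipe).keys,
      ((PySem.Dict.ofList (ingredients.map (fun p => (p.1, PySem.Dict.ofList p.2)))).getD item PySem.Dict.empty).contains "calories" = true)
instance (ingredients : List (String × List (String × Int))) (recipe : List (String × Int)) (calories : Int) : Decidable (Pre_recipe_score ingredients recipe calories) := by unfold Pre_recipe_score; infer_instance

def pvWitness_recipe_score : (List (String × List (String × Int))) × (List (String × Int)) × Int :=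
  ([("b", [("cap", 2), ("calories", 5)])], [("b", 3)], 15)

def Spec_recipe_score (ingredients : List (String × List (String × Int))) (recipe : List (String × Int)) (calories : Int) (out : Int) : Prop := out = recipe_score_alt ingredients recipe calories
instance (ingredients : List (String × List (String × Int))) (recipe : List (String × Int)) (calories : Int) (out : Int) : Decidable (Spec_recipe_score ingredients recipe calories out) := by unfold Spec_recipe_score; infer_instance

-- ===== CLAIM (what is proved, stated in full; the proofs are below) =====
def Claim_equal_recipe_score : Prop := ∀ (ingredients : List (String × List (String × Int))) (recipe : List (String × Int)) (calories : Int), Dom_recipe_score ingredients recipe calories → Pre_recipe_score ingredients recipe calories → Spec_recipe_score ingredients recipe calories (recipe_score ingredients recipe calories)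

-- ===== LEMMAS AND PROOFS =====

-- A's if/else update of score[prop] is a single insert (score.get(prop, 0) is 0 exactly when absent)
theorem bodyA_eq (sc : PySem.Dict String Int) (q : String) (c : Int) :
    (if sc.contains q then sc.insert q (sc.getD q 0 + c) else sc.insert q c)
      = sc.insert q (sc.getD q 0 + c) := by
  by_cases h : sc.contains q = true
  · simp [h]
  · have h' : sc.contains q = false := by simpa using h
    rw [h', if_neg (by simp), PySem.Dict.getD_of_not_contains sc 0 h', zero_add]

theorem inner_getD (ks : List String) (w : String → Int) (sc : PySem.Dict String Int) (p : String)
    (hks : ks.Nodup) :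
    (ks.foldl (fun sc q => sc.insert q (sc.getD q 0 + w q)) sc).getD p 0
      = sc.getD p 0 + (if p ∈ ks then w p else 0) := by
  induction ks generalizing sc with
  | nil => simp
  | cons q rest ih =>
    simp only [List.foldl_cons]
    rw [ih _ hks.of_cons]
    by_cases hpq : p = q
    · subst hpq
      have hnot : p ∉ rest := (List.nodup_cons.mp hks).1
      simp [hnot]
    · simp [PySem.Dict.getD_insert, hpq]

theorem outer_getD (ing : PySem.Dict String (PySem.Dict String Int)) (rc : PySem.Dict String Int)
    (items : List String) (sc : PySem.Dict String Int) (p : String)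
    (hvals : ∀ it : String, ((ing.getD it PySem.Dict.empty).keys).Nodup) :
    (items.foldl (fun sc item =>
        ((ing.getD item PySem.Dict.empty).keys).foldl (fun sc prop =>
          if sc.contains prop then
            sc.insert prop (sc.getD prop 0 + rc.getD item 0 * (ing.getD item PySem.Dict.empty).getD prop 0)
          else
            sc.insert prop (rc.getD item 0 * (ing.getD item PySem.Dict.empty).getD prop 0)) sc) sc).getD p 0
      = sc.getD p 0 +
        ((items.filter (fun it => (ing.getD it PySem.Dict.empty).contains p)).map
          (fun it => rc.getD it 0 * (ing.getD it PySem.Dict.empty).getD p 0)).sum := by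
  induction items generalizing sc with
  | nil => simp
  | cons it rest ih =>
    simp only [List.foldl_cons]
    rw [ih]
    rw [PySem.List.foldl_congr_mem _ _
      (fun sc q => sc.insert q (sc.getD q 0 + rc.getD it 0 * (ing.getD it PySem.Dict.empty).getD q 0)) sc
      (fun sc q _ => bodyA_eq sc q _)]
    rw [inner_getD _ _ _ _ (hvals it)]
    by_cases hc : (ing.getD it PySem.Dict.empty).contains p = true
    · have hm : p ∈ (ing.getD it PySem.Dict.empty).keys :=
        (PySem.Dict.contains_iff_mem_keys _ _).mp hc
      simp [hc, hm]
      ring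
    · have hc' : (ing.getD it PySem.Dict.empty).contains p = false := by simpa using hc
      have hm : p ∉ (ing.getD it PySem.Dict.empty).keys := by
        intro hmem
        exact absurd ((PySem.Dict.contains_iff_mem_keys _ _).mpr hmem) (by simp [hc'])
      simp [hc', hm]

theorem outer_keys (ing : PySem.Dict String (PySem.Dict String Int)) (rc : PySem.Dict String Int)
    (items : List String) (sc : PySem.Dict String Int) :
    (items.foldl (fun sc item =>
        ((ing.getD item PySem.Dict.empty).keys).foldl (fun sc prop =>
          if sc.contains prop then
            sc.insert prop (sc.getD prop 0 + rc.getD item 0 * (ing.getD item PySem.Dict.empty).getD prop 0)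
          else
            sc.insert prop (rc.getD item 0 * (ing.getD item PySem.Dict.empty).getD prop 0)) sc) sc).keys
      = items.foldl (fun ps item =>
          ((ing.getD item PySem.Dict.empty).keys).foldl (fun ps prop => PySem.Set.add ps prop) ps) sc.keys := by
  induction items generalizing sc with
  | nil => rfl
  | cons it rest ih =>
    simp only [List.foldl_cons]
    rw [ih]
    congr 1
    rw [PySem.List.foldl_congr_mem _ _
      (fun sc q => sc.insert q (sc.getD q 0 + rc.getD it 0 * (ing.getD it PySem.Dict.empty).getD q 0)) sc
      (fun sc q _ => bodyA_eq sc q _)]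
    rw [PySem.Dict.keys_foldl_insert]
    rw [← List.map_id ((ing.getD it PySem.Dict.empty).keys), PySem.Set.update_map_eq_foldl_add]
    simp

-- every value of a dict built by an insert fold is one of the inserted values (or was there before)
theorem values_update_sub {κ ν : Type} [BEq κ] [LawfulBEq κ] (ps : List (κ × ν)) (d : PySem.Dict κ ν) (v : ν)
    (h : v ∈ (ps.foldl (fun acc p => acc.insert p.1 p.2) d).values) :
    v ∈ d.values ∨ v ∈ ps.map (·.2) := by
  induction ps generalizing d with
  | nil => exact Or.inl h
  | cons p rest ih =>
    rcases ih _ h with h1 | h2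
    · rcases PySem.Dict.mem_values_insert _ _ _ _ h1 with rfl | hv
      · right; simp
      · exact Or.inl hv
    · right; simp only [List.map_cons, List.mem_cons]; exact Or.inr h2

theorem iv_keys_nodup (ingredients : List (String × List (String × Int))) (it : String) :
    (((ingDict ingredients).getD it PySem.Dict.empty).keys).Nodup := by
  by_cases h : (ingDict ingredients).contains it = true
  · have hs : ((ingDict ingredients).get? it).isSome = true := by
      rw [← PySem.Dict.contains_eq_isSome_get?]; exact h
    obtain ⟨v, hv⟩ := Option.isSome_iff_exists.mp hs
    have hval : v ∈ (ingDict ingredients).values := by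
      have hmem := PySem.Dict.mem_items_of_get?_eq_some _ hv
      simp only [PySem.Dict.values]
      exact List.mem_map_of_mem hmem
    have : v ∈ (PySem.Dict.empty : PySem.Dict String (PySem.Dict String Int)).values ∨
        v ∈ (ingredients.map (fun p => (p.1, PySem.Dict.ofList p.2))).map (·.2) := by
      apply values_update_sub
      simpa [ingDict, PySem.Dict.ofList, PySem.Dict.update] using hval
    rcases this with habs | hmem
    · simp [PySem.Dict.empty, PySem.Dict.values] at habs
    · rw [PySem.Dict.getD_of_get?_eq_some _ _ hv]
      simp only [List.map_map, List.mem_map] at hmem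
      obtain ⟨p, _, hp⟩ := hmem
      rw [← hp]
      exact PySem.Dict.nodup_keys_ofList _
  · have h' : (ingDict ingredients).contains it = false := by simpa using h
    rw [PySem.Dict.getD_of_not_contains _ _ h']
    simp [PySem.Dict.empty, PySem.Dict.keys]

theorem props_eq (ingredients : List (String × List (String × Int))) (rc : PySem.Dict String Int) :
    propsLoopB (ingDict ingredients) rc = (scoreLoopA (ingDict ingredients) rc).keys := by
  rw [scoreLoopA, outer_keys]
  rfl

-- B's recomputed per-property total (unfiltered, with get(prop,0)) equals A's accumulated score entry
theorem propTotal_filter (ing : PySem.Dict String (PySem.Dict String Int)) (rc : PySem.Dict String Int)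
    (p : String) (items : List String) (s : Int) :
    items.foldl (fun s item => s + rc.getD item 0 * (ing.getD item PySem.Dict.empty).getD p 0) s
      = s + ((items.filter (fun it => (ing.getD it PySem.Dict.empty).contains p)).map
          (fun it => rc.getD it 0 * (ing.getD it PySem.Dict.empty).getD p 0)).sum := by
  induction items generalizing s with
  | nil => simp
  | cons it rest ih =>
    simp only [List.foldl_cons]
    by_cases hc : (ing.getD it PySem.Dict.empty).contains p = true
    · rw [ih]; simp [hc]; ring
    · have hc' : (ing.getD it PySem.Dict.empty).contains p = false := by simpa using hc
      rw [ih]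
      rw [PySem.Dict.getD_of_not_contains _ _ hc']
      simp [hc']

theorem score_getD_eq (ingredients : List (String × List (String × Int))) (rc : PySem.Dict String Int) (p : String) :
    (scoreLoopA (ingDict ingredients) rc).getD p 0 = propTotalB (ingDict ingredients) rc p := by
  rw [scoreLoopA, outer_getD _ _ _ _ _ (iv_keys_nodup ingredients), propTotalB, propTotal_filter]
  simp

theorem prodLoop_eq (ingredients : List (String × List (String × Int))) (rc : PySem.Dict String Int)
    (ps : List String) (t : Int) :
    prodLoopA ps (scoreLoopA (ingDict ingredients) rc) t = prodLoopB (ingDict ingredients) rc ps t := by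
  induction ps generalizing t with
  | nil => rfl
  | cons p rest ih =>
    by_cases h : p = "calories"
    · simp [prodLoopA, prodLoopB, h, ih]
    · by_cases hlt : (scoreLoopA (ingDict ingredients) rc).getD p 0 < 1
      · simp [prodLoopA, prodLoopB, h, hlt, ← score_getD_eq]
      · simp [prodLoopA, prodLoopB, h, hlt, ← score_getD_eq, ih]

theorem recipe_score_eq (ingredients : List (String × List (String × Int))) (recipe : List (String × Int)) (calories : Int) :
    recipe_score ingredients recipe calories = recipe_score_alt ingredients recipe calories := by
  simp only [recipe_score, recipe_score_alt, score_getD_eq, ← props_eq, prodLoop_eq]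
  by_cases h : calories = -1
  · simp [h]
  · by_cases hc : propTotalB (ingDict ingredients) (PySem.Dict.ofList recipe) "calories" = calories <;>
      simp [h, hc]

-- ===== VERDICT (by name: the statement is the Claim_ definition above) =====
theorem recipe_score_spec : Claim_equal_recipe_score := by
  intro ingredients recipe calories _ _
  unfold Spec_recipe_score
  exact recipe_score_eq ingredients recipe calories
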